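-- pv_equiv track=rewrite | github.com/p-lots/codewars | 7-kyu/upper--body--strength/python/solution.py | alex_mistakes
-- ===== SOURCE A (Python) =====
-- def alex_mistakes(number_of_katas, time_limit):
--     MINUTES_PER_KATA = 6
--     if number_of_katas * MINUTES_PER_KATA >= time_limit:
--         return 0
--     leftover = time_limit - number_of_katas * MINUTES_PER_KATA
--     ret = 0
--     time_for_pushups = 5
--     while leftover - time_for_pushups >= 0:
--         ret += 1
--         leftover -= time_for_pushups
--         time_for_pushups *= 2
--     return ret
-- ===== SOURCE B (Python) =====
-- def alex_mistakes(number_of_katas, time_limit):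
--     leftover = time_limit - number_of_katas * 6
--     if leftover <= 0:
--         return 0
--     # after n pushup rounds the total time spent is 5*(2^n - 1);
--     # the answer is the largest n with 5*(2^n - 1) <= leftover
--     return (leftover // 5 + 1).bit_length() - 1
-- ===== Notes on version B (the rewrite author's own statement) =====
-- stated objective: simpler
-- what changed: Replaces the geometric-subtraction while loop with a closed form: after n rounds the pushups cost 5*(2^n-1), so the answer is (leftover//5 + 1).bit_length() - 1.
import Mathlib
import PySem

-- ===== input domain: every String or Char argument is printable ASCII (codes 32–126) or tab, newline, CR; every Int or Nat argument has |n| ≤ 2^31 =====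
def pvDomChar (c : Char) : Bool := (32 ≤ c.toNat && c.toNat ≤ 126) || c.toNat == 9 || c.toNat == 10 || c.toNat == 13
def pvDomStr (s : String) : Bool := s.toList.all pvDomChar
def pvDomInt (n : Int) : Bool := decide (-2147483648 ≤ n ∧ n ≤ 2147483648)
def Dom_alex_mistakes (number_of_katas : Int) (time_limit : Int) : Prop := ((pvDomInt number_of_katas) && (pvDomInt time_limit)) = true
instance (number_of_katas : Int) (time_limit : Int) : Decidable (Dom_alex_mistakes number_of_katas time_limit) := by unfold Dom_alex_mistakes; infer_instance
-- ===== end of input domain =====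

-- B replaces A's doubling while-loop by the closed form (leftover//5 + 1).bit_length() - 1 (simpler, O(1)).

-- ===== PORT A =====
-- the while loop of A; fuel only makes the recursion total (never exhausted on the inputs reached)
def alexLoop (fuel : Nat) (leftover : Int) (time_for_pushups : Int) (ret : Int) : Int :=
  match fuel with
  | 0 => ret
  | fuel + 1 =>
    if leftover - time_for_pushups ≥ 0 then
      alexLoop fuel (leftover - time_for_pushups) (time_for_pushups * 2) (ret + 1)
    else ret

def alex_mistakes (number_of_katas : Int) (time_limit : Int) : Int :=
  if number_of_katas * 6 ≥ time_limit then 0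
  else
    alexLoop (time_limit - number_of_katas * 6).toNat (time_limit - number_of_katas * 6) 5 0

-- ===== PORT B =====
def alex_mistakes_alt (number_of_katas : Int) (time_limit : Int) : Int :=
  let leftover := time_limit - number_of_katas * 6
  if leftover ≤ 0 then 0
  else (PySem.Int.bitLength (PySem.Int.floordiv leftover 5 + 1) : Int) - 1

-- ===== PRECONDITION & SPEC =====
def Spec_alex_mistakes (number_of_katas : Int) (time_limit : Int) (out : Int) : Prop := out = alex_mistakes_alt number_of_katas time_limit
instance (number_of_katas : Int) (time_limit : Int) (out : Int) : Decidable (Spec_alex_mistakes number_of_katas time_limit out) := by unfold Spec_alex_mistakes; infer_instance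

-- ===== CLAIM (what is proved, stated in full; the proofs are below) =====
def Claim_equal_alex_mistakes : Prop := ∀ (number_of_katas : Int) (time_limit : Int), Dom_alex_mistakes number_of_katas time_limit → Spec_alex_mistakes number_of_katas time_limit (alex_mistakes number_of_katas time_limit)

-- ===== LEMMAS AND PROOFS =====

-- loop characterisation: starting from step size p ≥ 5 with 0 ≤ leftover L and enough fuel,
-- the loop adds bit_length(L//p + 1) - 1 to the accumulator
lemma alexLoop_eq (fuel : Nat) : ∀ (L p r : Int), 0 ≤ L → 5 ≤ p → L.toNat ≤ fuel →
    alexLoop fuel L p r = r + ((PySem.Int.bitLength (PySem.Int.floordiv L p + 1) : Int) - 1) := by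
  induction fuel with
  | zero =>
    intro L p r hL hp hf
    have hL0 : L = 0 := by omega
    subst hL0
    have : PySem.Int.floordiv 0 p = 0 := by
      rw [PySem.Int.floordiv_eq_ediv_of_pos (by omega)]; simp
    simp [alexLoop, this]
    decide
  | succ fuel ih =>
    intro L p r hL hp hf
    rw [alexLoop]
    split_ifs with hcond
    · -- one iteration: L ≥ p
      have hLp : p ≤ L := by omega
      have hrec := ih (L - p) (p * 2) (r + 1) (by omega) (by omega)
        (by omega)
      rw [hrec]
      -- remains: arithmetic identity on bit lengths
      have hQ1 : 1 ≤ PySem.Int.floordiv L p :=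
        (PySem.Int.le_floordiv_iff_mul_le (by omega)).2 (by omega)
      have hpos : 0 < PySem.Int.floordiv L p + 1 := by omega
      rw [PySem.Int.bitLength_of_pos hpos]
      have hdiv : PySem.Int.floordiv (PySem.Int.floordiv L p + 1) 2
          = PySem.Int.floordiv (L - p) (p * 2) + 1 := by
        rw [PySem.Int.floordiv_eq_ediv_of_pos (a := L) (by omega),
            PySem.Int.floordiv_eq_ediv_of_pos (by omega),
            PySem.Int.floordiv_eq_ediv_of_pos (by omega)]
        have h1 : (L - p) / (p * 2) = (L - p) / p / 2 :=
          (Int.ediv_ediv_eq_ediv_mul (by omega)).symm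
        have h2 : (L - p) / p = L / p - 1 := by
          have h := Int.add_mul_ediv_right L (-1) (c := p) (by omega : p ≠ 0)
          rw [neg_one_mul] at h
          rw [sub_eq_add_neg, h]
          ring
        have hQ : 1 ≤ L / p := by
          rwa [PySem.Int.floordiv_eq_ediv_of_pos (by omega)] at hQ1
        rw [h1, h2]
        omega
      rw [hdiv]
      push_cast
      ring
    · -- loop exits immediately: 0 ≤ L < p, so L//p = 0 and bit_length 1 = 1
      have h0 : PySem.Int.floordiv L p = 0 := by
        rw [PySem.Int.floordiv_eq_ediv_of_pos (by omega)]
        exact Int.ediv_eq_zero_of_lt hL (by omega)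
      rw [h0]
      have : PySem.Int.bitLength 1 = 1 := by decide
      rw [show (0 : Int) + 1 = 1 by ring, this]
      simp

-- ===== VERDICT (by name: the statement is the Claim_ definition above) =====
theorem alex_mistakes_spec : Claim_equal_alex_mistakes := by
  intro k t _
  unfold Spec_alex_mistakes alex_mistakes alex_mistakes_alt
  by_cases h1 : k * 6 ≥ t
  · rw [if_pos h1]
    simp [show t - k * 6 ≤ 0 by omega]
  · rw [if_neg h1, alexLoop_eq _ _ _ _ (by omega) (by omega) le_rfl]
    simp [show ¬(t - k * 6 ≤ 0) by omega]
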